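-- pv_equiv track=rewrite | github.com/AdamZhouSE/pythonHomework | Code/CodeRecords/2763/60739/307667.py | getTotalNumberOfSequences
-- ===== SOURCE A (Python) =====
-- def getTotalNumberOfSequences(m, n):
--     if m < n:
--         return 0
--
--     if n == 0:
--         return 1
--     res = (getTotalNumberOfSequences(m - 1, n) +
--            getTotalNumberOfSequences(m // 2, n - 1))
--     return res
-- ===== SOURCE B (Python) =====
-- def getTotalNumberOfSequences(m, n):
--     if m < n:
--         return 0
--     if n == 0:
--         return 1
--     if n > m.bit_length():
--         return 0
--     # row[x] = number of valid sequences of length j with values in 1..x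
--     row = [1] * (m + 1)
--     for j in range(1, n + 1):
--         new = []
--         s = 0
--         for x in range(m + 1):
--             if x >= j:
--                 s += row[x // 2]
--             new.append(s)
--         row = new
--     return row[m]
-- ===== Notes on version B (the rewrite author's own statement) =====
-- stated objective: faster
-- what changed: Replaces A's exponential branching recursion f(m,n)=f(m-1,n)+f(m//2,n-1) by a bottom-up DP that builds the row [f(0,j),...,f(m,j)] for j=1..n with a running prefix sum, reusing each subresult once.
import Mathlib
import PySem

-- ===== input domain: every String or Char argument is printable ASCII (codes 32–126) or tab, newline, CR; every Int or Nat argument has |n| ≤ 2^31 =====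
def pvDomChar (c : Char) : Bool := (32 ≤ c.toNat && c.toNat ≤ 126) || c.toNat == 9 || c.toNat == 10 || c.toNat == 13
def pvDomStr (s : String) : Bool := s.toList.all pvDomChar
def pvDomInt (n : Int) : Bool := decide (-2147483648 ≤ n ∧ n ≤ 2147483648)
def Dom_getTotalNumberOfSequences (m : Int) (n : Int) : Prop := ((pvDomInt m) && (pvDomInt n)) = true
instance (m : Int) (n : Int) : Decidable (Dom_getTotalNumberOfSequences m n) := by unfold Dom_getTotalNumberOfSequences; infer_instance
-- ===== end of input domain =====

-- B replaces A's branching recursion by a bottom-up DP row with a running prefix sum, plus a bit_length early-out for counts that are 0.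

-- ===== PORT A =====
-- Literal port of A's recursion; the extra `n < 0` guard only totalizes the cases
-- where the Python recurses forever (excluded by Pre_), returning 0 there.
def getTotalNumberOfSequences (m : Int) (n : Int) : Int :=
  if m < n then 0
  else if n = 0 then 1
  else if n < 0 then 0
  else getTotalNumberOfSequences (m - 1) n
       + getTotalNumberOfSequences (PySem.Int.floordiv m 2) (n - 1)
termination_by (n.toNat, m.toNat)
decreasing_by
  · exact Prod.Lex.right _ (by omega)
  · exact Prod.Lex.left _ _ (by omega)

-- ===== PORT B =====
-- inner loop body: `if x >= j: s += row[x // 2]; new.append(s)` on state (s, new)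
-- (row[x//2] is ported as pyGetD with default 0; the index is proven in range in the lemmas)
def pvInnerStep (row : List Int) (j : Int) (st : Int × List Int) (x : Int) : Int × List Int :=
  let s := if j ≤ x then st.1 + PySem.List.pyGetD row (PySem.Int.floordiv x 2) 0 else st.1
  (s, st.2 ++ [s])

-- one iteration of the outer loop: build `new` from `row`
def pvOuterStep (m : Int) (row : List Int) (j : Int) : List Int :=
  ((PySem.List.pyRange 0 (m + 1) 1).foldl (pvInnerStep row j) (0, [])).2

def getTotalNumberOfSequences_alt (m : Int) (n : Int) : Int :=
  if m < n then 0
  else if n = 0 then 1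
  else if (PySem.Int.bitLength m : Int) < n then 0
  else
    PySem.List.pyGetD
      ((PySem.List.pyRange 1 (n + 1) 1).foldl (pvOuterStep m)
        (List.replicate (m + 1).toNat 1)) m 0

-- ===== PRECONDITION & SPEC =====
-- Pre_ excludes exactly the inputs with n < 0 ≤ m - n distance, i.e. n < 0 ∧ m ≥ n,
-- where the Python A recurses without bound (RecursionError); everywhere A returns, Pre_ holds.
def Pre_getTotalNumberOfSequences (m : Int) (n : Int) : Prop := 0 ≤ n ∨ m < n
instance (m : Int) (n : Int) : Decidable (Pre_getTotalNumberOfSequences m n) := by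
  unfold Pre_getTotalNumberOfSequences; infer_instance

def pvWitness_getTotalNumberOfSequences : Int × Int := (6, 2)

def Spec_getTotalNumberOfSequences (m : Int) (n : Int) (out : Int) : Prop := out = getTotalNumberOfSequences_alt m n
instance (m : Int) (n : Int) (out : Int) : Decidable (Spec_getTotalNumberOfSequences m n out) := by unfold Spec_getTotalNumberOfSequences; infer_instance

-- ===== CLAIM (what is proved, stated in full; the proofs are below) =====
def Claim_equal_getTotalNumberOfSequences : Prop := ∀ (m : Int) (n : Int), Dom_getTotalNumberOfSequences m n → Pre_getTotalNumberOfSequences m n → Spec_getTotalNumberOfSequences m n (getTotalNumberOfSequences m n)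

-- ===== LEMMAS AND PROOFS =====

lemma F_of_lt {m n : Int} (h : m < n) : getTotalNumberOfSequences m n = 0 := by
  rw [getTotalNumberOfSequences]; simp [h]

lemma F_zero {m : Int} (h : 0 ≤ m) : getTotalNumberOfSequences m 0 = 1 := by
  rw [getTotalNumberOfSequences]; simp [h]

lemma F_rec {m n : Int} (hn : 1 ≤ n) (hm : n ≤ m) :
    getTotalNumberOfSequences m n
      = getTotalNumberOfSequences (m - 1) n
        + getTotalNumberOfSequences (PySem.Int.floordiv m 2) (n - 1) := by
  rw [getTotalNumberOfSequences]
  have h1 : ¬ m < n := by omega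
  have h2 : ¬ n = 0 := by omega
  have h3 : ¬ n < 0 := by omega
  simp [h1, h2, h3]

-- the count is 0 whenever m < 2^(n-1): no length-n doubling chain fits below m
lemma F_vanish_aux (p : Nat) (hp : ∀ m : Int, m < 2 ^ p → getTotalNumberOfSequences m ((p : Int) + 1) = 0) :
    ∀ (k : Nat) (m : Int), m.toNat = k → m < 2 ^ (p + 1) →
      getTotalNumberOfSequences m ((p : Int) + 2) = 0 := by
  intro k
  induction k using Nat.strong_induction_on with
  | _ k ihk =>
    intro m hmk hm
    by_cases hlt : m < (p : Int) + 2
    · exact F_of_lt hlt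
    · have h2p : (2 : Int) ^ (p + 1) = 2 * 2 ^ p := by ring
      have hf : PySem.Int.floordiv m 2 = m / 2 :=
        PySem.Int.floordiv_eq_ediv_of_pos (by omega)
      rw [F_rec (by omega) (by omega), hf,
          show (p : Int) + 2 - 1 = (p : Int) + 1 by ring,
          ihk (m - 1).toNat (by omega) (m - 1) rfl (by omega),
          hp (m / 2) (by omega)]
      ring

lemma F_vanish (p : Nat) : ∀ m : Int, m < 2 ^ p → getTotalNumberOfSequences m ((p : Int) + 1) = 0 := by
  induction p with
  | zero =>
      intro m hm
      exact F_of_lt (by omega)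
  | succ p ih =>
      intro m hm
      have := F_vanish_aux p ih m.toNat m rfl hm
      rw [show ((p : Int)) + 2 = ((p + 1 : Nat) : Int) + 1 by push_cast; ring] at this
      exact this

-- inner loop invariant: after processing x = 0 .. k-1, the state is
-- (F (k-1) j, [F 0 j, …, F (k-1) j])
lemma inner_invariant (m j : Int) (hm : 0 ≤ m) (hj : 1 ≤ j) (k : Nat)
    (hk : (k : Int) ≤ m + 1) :
    (PySem.List.pyRange 0 (k : Int) 1).foldl
        (pvInnerStep ((PySem.List.pyRange 0 (m + 1) 1).map
          (fun x => getTotalNumberOfSequences x (j - 1))) j) (0, [])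
      = (getTotalNumberOfSequences ((k : Int) - 1) j,
         (PySem.List.pyRange 0 (k : Int) 1).map (fun x => getTotalNumberOfSequences x j)) := by
  induction k with
  | zero =>
      simp [PySem.List.pyRange_one_eq_nil]
      exact (F_of_lt (by omega)).symm
  | succ k ih =>
      have hsplit : PySem.List.pyRange 0 ((k : Int) + 1) 1
          = PySem.List.pyRange 0 (k : Int) 1 ++ [(k : Int)] :=
        PySem.List.pyRange_one_succ_right (by omega)
      have hcast : ((k + 1 : Nat) : Int) = (k : Int) + 1 := by push_cast; ring
      rw [hcast, hsplit, List.foldl_append, List.map_append, ih (by omega)]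
      have hget : PySem.List.pyGetD
          ((PySem.List.pyRange 0 (m + 1) 1).map
            (fun x => getTotalNumberOfSequences x (j - 1)))
          (PySem.Int.floordiv (k : Int) 2) 0
          = getTotalNumberOfSequences (PySem.Int.floordiv (k : Int) 2) (j - 1) := by
        apply PySem.List.pyGetD_map_pyRange_of_nonneg
        · have := PySem.Int.floordiv_eq_ediv_of_pos (a := (k : Int)) (b := 2) (by omega)
          omega
        · have := PySem.Int.floordiv_eq_ediv_of_pos (a := (k : Int)) (b := 2) (by omega)
          omega
      simp only [List.foldl_cons, List.foldl_nil, pvInnerStep, List.map_cons, List.map_nil]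
      rw [show (k : Int) + 1 - 1 = (k : Int) by ring]
      by_cases hx : j ≤ (k : Int)
      · rw [if_pos hx, hget, F_rec (m := (k : Int)) (n := j) hj hx]
      · rw [if_neg hx, F_of_lt (show (k : Int) - 1 < j by omega),
            F_of_lt (show (k : Int) < j by omega)]

-- outer loop invariant: after j = 1 .. t, row = [F 0 t, …, F m t]
lemma outer_invariant (m : Int) (hm : 0 ≤ m) (t : Nat) :
    (PySem.List.pyRange 1 ((t : Int) + 1) 1).foldl (pvOuterStep m)
        (List.replicate (m + 1).toNat 1)
      = (PySem.List.pyRange 0 (m + 1) 1).map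
          (fun x => getTotalNumberOfSequences x (t : Int)) := by
  induction t with
  | zero =>
      simp [PySem.List.pyRange_one_eq_nil]
      have hmap : (PySem.List.pyRange 0 (m + 1) 1).map
          (fun x => getTotalNumberOfSequences x 0)
          = (PySem.List.pyRange 0 (m + 1) 1).map (fun _ => (1 : Int)) := by
        apply List.map_congr_left
        intro x hx
        rw [PySem.List.mem_pyRange_one] at hx
        exact F_zero hx.1
      rw [hmap, List.map_const']
      simp [PySem.List.length_pyRange_one]
  | succ t ih =>
      have hcast : ((t + 1 : Nat) : Int) = (t : Int) + 1 := by push_cast; ring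
      have hsplit : PySem.List.pyRange 1 ((t : Int) + 1 + 1) 1
          = PySem.List.pyRange 1 ((t : Int) + 1) 1 ++ [(t : Int) + 1] :=
        PySem.List.pyRange_one_succ_right (by omega)
      rw [hcast, hsplit, List.foldl_append, ih]
      have hk : ((m + 1).toNat : Int) = m + 1 := by omega
      have := inner_invariant m ((t : Int) + 1) hm (by omega) (m + 1).toNat (by omega)
      rw [hk] at this
      have harg : (t : Int) + 1 - 1 = (t : Int) := by ring
      rw [harg] at this
      unfold pvOuterStep
      simp only [List.foldl_cons, List.foldl_nil]
      rw [this]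

theorem getTotalNumberOfSequences_spec : Claim_equal_getTotalNumberOfSequences := by
  intro m n _ hpre
  unfold Spec_getTotalNumberOfSequences getTotalNumberOfSequences_alt
  by_cases h1 : m < n
  · simp [h1, F_of_lt h1]
  · by_cases h2 : n = 0
    · subst h2
      have hm : 0 ≤ m := by omega
      simp [h1, F_zero hm]
    · have hn : 1 ≤ n := by
        rcases hpre with h | h
        · omega
        · omega
      have hm : 0 ≤ m := by omega
      simp only [h1, h2, if_false]
      by_cases hbl : ((PySem.Int.bitLength m : Nat) : Int) < n
      · -- early-out branch of B: both sides are 0 since m < 2^(n-1)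
        rw [if_pos hbl]
        have hpow : m < 2 ^ (n.toNat - 1) := by
          have h1' := PySem.Int.lt_two_pow_bitLength m
          have h2' : (2 : Nat) ^ PySem.Int.bitLength m ≤ 2 ^ (n.toNat - 1) :=
            Nat.pow_le_pow_right (by omega) (by omega)
          have h3' : m.natAbs < 2 ^ (n.toNat - 1) := lt_of_lt_of_le h1' h2'
          have h4' : ((m.natAbs : Nat) : Int) = m := Int.natAbs_of_nonneg hm
          calc m = ((m.natAbs : Nat) : Int) := h4'.symm
            _ < ((2 ^ (n.toNat - 1) : Nat) : Int) := by exact_mod_cast h3'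
            _ = 2 ^ (n.toNat - 1) := by push_cast; ring
        have hv := F_vanish (n.toNat - 1) m hpow
        rw [show ((n.toNat - 1 : Nat) : Int) + 1 = n by omega] at hv
        exact hv
      · rw [if_neg hbl]
        have hcast : ((n.toNat : Int)) = n := by omega
        have := outer_invariant m hm n.toNat
        rw [hcast] at this
        rw [this]
        rw [PySem.List.pyGetD_map_pyRange_of_nonneg _ _ _ _ hm (by omega)]
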